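-- pv_equiv track=rewrite | github.com/opencomputeproject/Time-Appliance-Project | Incubation/Software/WiWi/SDR/V3/WiWi_SDR/ClockmatrixTools/renesas_cm_registers.py | int_to_signed_nbit
-- ===== SOURCE A (Python) =====
-- def int_to_signed_nbit(number, n_bits):
--     """
--     Interpret an integer as an n-bit signed integer and return its decimal equivalent.
--
--     :param number: The integer to be interpreted
--     :param n_bits: The bit size of the signed integer
--     :return: Decimal equivalent of the n-bit signed integer
--     """
--     # Mask to extract n_bits
--     mask = (1 << n_bits) - 1
--     number = number & mask
--
--     # Check if negative (if MSB is 1)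
--     is_negative = (number >> (n_bits - 1)) & 1
--
--     # Function to calculate two's complement for negative numbers
--     def twos_complement(binary_str):
--         # Invert the bits
--         inverted = ''.join('1' if b == '0' else '0' for b in binary_str)
--         # Add 1
--         decimal = int(inverted, 2) + 1
--         return -1 * decimal
--
--     binary_n_bit = format(number, f'0{n_bits}b')
--
--     # Convert to decimal
--     if is_negative:
--         return twos_complement(binary_n_bit)
--     else:
--         return int(binary_n_bit, 2)
-- ===== SOURCE B (Python) =====
-- def int_to_signed_nbit(number, n_bits):
--     """Interpret an integer as an n-bit signed integer (arithmetic form)."""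
--     m = number & ((1 << n_bits) - 1)
--     if (m >> (n_bits - 1)) & 1:
--         return m - (1 << n_bits)
--     return m
-- ===== Notes on version B (the rewrite author's own statement) =====
-- stated objective: simpler
-- what changed: Replaces A's textual two's-complement (format to a binary string, invert each character, reparse with int(_,2)) by the closed-form arithmetic m - 2**n_bits when the sign bit is set.
import Mathlib
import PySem

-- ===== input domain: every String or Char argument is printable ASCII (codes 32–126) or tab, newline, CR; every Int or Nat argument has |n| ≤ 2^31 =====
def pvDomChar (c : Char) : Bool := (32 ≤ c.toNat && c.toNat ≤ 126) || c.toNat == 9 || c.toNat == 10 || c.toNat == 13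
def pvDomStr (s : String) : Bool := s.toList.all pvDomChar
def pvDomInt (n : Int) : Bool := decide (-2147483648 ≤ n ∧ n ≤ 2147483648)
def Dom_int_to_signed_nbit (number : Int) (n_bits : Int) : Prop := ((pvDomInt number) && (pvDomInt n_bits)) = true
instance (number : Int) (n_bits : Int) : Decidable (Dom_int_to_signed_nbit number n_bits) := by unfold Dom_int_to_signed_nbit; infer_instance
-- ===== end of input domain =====

-- B replaces A's textual two's-complement (format to a binary string, invert the
-- characters, reparse) by the closed-form arithmetic m - 2^n_bits: simpler.

-- ===== PORT A =====

-- the digit-producing loop inside format(n, 'b'): peel bits LSB first onto an accumulator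
def pvBinCore (n : Nat) (acc : List Char) : List Char :=
  if h : n = 0 then acc
  else pvBinCore (n / 2) ((if n % 2 = 1 then '1' else '0') :: acc)
decreasing_by exact Nat.div_lt_self (Nat.pos_of_ne_zero h) (by norm_num)

-- format(n, 'b') for a nonnegative n (format(0,'b') = "0")
def pvFormatBin (n : Nat) : List Char := if n = 0 then ['0'] else pvBinCore n []

-- the '0{n_bits}' width padding of the format spec
def pvPad (width : Nat) (s : List Char) : List Char := List.replicate (width - s.length) '0' ++ s

-- int(s, 2) on a binary-digit string
def pvParseBin (s : List Char) : Int := s.foldl (fun acc c => 2 * acc + (if c = '1' then 1 else 0)) 0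

-- ''.join('1' if b == '0' else '0' for b in s)
def pvInvert (s : List Char) : List Char := s.map (fun c => if c = '0' then '1' else '0')

-- the nested helper: invert the bits, add 1, negate
def pvTwosComplement (s : List Char) : Int := -1 * (pvParseBin (pvInvert s) + 1)

def int_to_signed_nbit (number : Int) (n_bits : Int) : Int :=
  -- 1 << n_bits; under Pre_ n_bits ≥ 1 so the shift is 2 ^ n_bits exactly
  let mask : Int := 2 ^ n_bits.toNat - 1
  let number' : Int := PySem.Int.band number mask
  -- (number >> (n_bits - 1)) & 1; number' ≥ 0, Python >> is floor shift = Lean's Int >>> on Nat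
  let is_negative : Int := PySem.Int.band (number' >>> (n_bits - 1).toNat) 1
  -- format(number, f'0{n_bits}b'); number' ≥ 0 so .toNat is exact
  let binary_n_bit : List Char := pvPad n_bits.toNat (pvFormatBin number'.toNat)
  if is_negative ≠ 0 then pvTwosComplement binary_n_bit else pvParseBin binary_n_bit

-- ===== PORT B =====
def int_to_signed_nbit_alt (number : Int) (n_bits : Int) : Int :=
  let m : Int := PySem.Int.band number (2 ^ n_bits.toNat - 1)
  if PySem.Int.band (m >>> (n_bits - 1).toNat) 1 ≠ 0 then m - 2 ^ n_bits.toNat else m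

-- ===== PRECONDITION & SPEC =====
-- Python A raises ValueError ("negative shift count") for n_bits ≤ 0; B raises there too.
def Pre_int_to_signed_nbit (number : Int) (n_bits : Int) : Prop := 1 ≤ n_bits
instance (number : Int) (n_bits : Int) : Decidable (Pre_int_to_signed_nbit number n_bits) := by unfold Pre_int_to_signed_nbit; infer_instance

def pvWitness_int_to_signed_nbit : Int × Int := (200, 8)

def Spec_int_to_signed_nbit (number : Int) (n_bits : Int) (out : Int) : Prop := out = int_to_signed_nbit_alt number n_bits
instance (number : Int) (n_bits : Int) (out : Int) : Decidable (Spec_int_to_signed_nbit number n_bits out) := by unfold Spec_int_to_signed_nbit; infer_instance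

-- ===== CLAIM (what is proved, stated in full; the proofs are below) =====
def Claim_equal_int_to_signed_nbit : Prop := ∀ (number : Int) (n_bits : Int), Dom_int_to_signed_nbit number n_bits → Pre_int_to_signed_nbit number n_bits → Spec_int_to_signed_nbit number n_bits (int_to_signed_nbit number n_bits)

-- ===== LEMMAS AND PROOFS =====

lemma pvBand_bounds (a b : Int) (hb : 0 ≤ b) :
    0 ≤ PySem.Int.band a b ∧ PySem.Int.band a b ≤ b := by
  unfold PySem.Int.band
  split_ifs with ha
  · have h1 : a.toNat &&& b.toNat ≤ b.toNat := Nat.and_le_right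
    omega
  · omega

lemma pvParse_append (s : List Char) (c : Char) :
    pvParseBin (s ++ [c]) = 2 * pvParseBin s + (if c = '1' then 1 else 0) := by
  simp [pvParseBin, List.foldl_append]

lemma pvParse_replicate_append (k : Nat) (s : List Char) :
    pvParseBin (List.replicate k '0' ++ s) = pvParseBin s := by
  induction k with
  | zero => simp
  | succ n ih => simpa [pvParseBin, List.replicate_succ] using ih

-- proof-side view of the digit loop: digits MSB first, no accumulator
def pvBinDigits (n : Nat) : List Char :=
  if h : n = 0 then []
  else pvBinDigits (n / 2) ++ [if n % 2 = 1 then '1' else '0']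
decreasing_by exact Nat.div_lt_self (Nat.pos_of_ne_zero h) (by norm_num)

lemma pvBinCore_eq (m : Nat) : ∀ acc : List Char, pvBinCore m acc = pvBinDigits m ++ acc := by
  induction m using Nat.strong_induction_on with
  | _ m ih =>
    intro acc
    by_cases h : m = 0
    · rw [pvBinCore, dif_pos h, pvBinDigits, dif_pos h]; simp
    · rw [pvBinCore, dif_neg h, pvBinDigits, dif_neg h,
        ih (m / 2) (Nat.div_lt_self (Nat.pos_of_ne_zero h) (by norm_num))]
      simp

lemma pvFormat_eq (m : Nat) : pvFormatBin m = if m = 0 then ['0'] else pvBinDigits m := by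
  unfold pvFormatBin
  split_ifs with h
  · rfl
  · rw [pvBinCore_eq]; simp

lemma pvParse_core (m : Nat) : pvParseBin (pvBinDigits m) = (m : Int) := by
  induction m using Nat.strong_induction_on with
  | _ m ih =>
    by_cases h : m = 0
    · rw [pvBinDigits, dif_pos h]; simp [h, pvParseBin]
    · rw [pvBinDigits, dif_neg h,
        pvParse_append, ih (m / 2) (Nat.div_lt_self (Nat.pos_of_ne_zero h) (by norm_num))]
      rcases Nat.mod_two_eq_zero_or_one m with h2 | h2 <;>
        simp [h2, show ('0' : Char) ≠ '1' from by decide] <;> omega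

lemma pvParse_format (m : Nat) : pvParseBin (pvFormatBin m) = (m : Int) := by
  rw [pvFormat_eq]
  split_ifs with h
  · simp [h, pvParseBin]
  · exact pvParse_core m

lemma pvCore_len_le (k : Nat) : ∀ m : Nat, m < 2 ^ k → (pvBinDigits m).length ≤ k := by
  induction k with
  | zero =>
    intro m hm
    interval_cases m
    simp [pvBinDigits]
  | succ k ih =>
    intro m hm
    by_cases h : m = 0
    · rw [pvBinDigits, dif_pos h]; simp
    · rw [pvBinDigits, dif_neg h]
      have := ih (m / 2) (by omega)
      simp
      omega

lemma pvFormat_len_le (k : Nat) (m : Nat) (hk : 1 ≤ k) (hm : m < 2 ^ k) :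
    (pvFormatBin m).length ≤ k := by
  rw [pvFormat_eq]
  split_ifs with h
  · simpa using hk
  · exact pvCore_len_le k m hm

def pvIsBin (s : List Char) : Prop := ∀ c ∈ s, c = '0' ∨ c = '1'

lemma pvCore_isBin (m : Nat) : pvIsBin (pvBinDigits m) := by
  induction m using Nat.strong_induction_on with
  | _ m ih =>
    by_cases h : m = 0
    · rw [pvBinDigits, dif_pos h]; intro c hc; simp at hc
    · rw [pvBinDigits, dif_neg h]
      intro c hc
      rcases List.mem_append.mp hc with h1 | h1
      · exact ih (m / 2) (Nat.div_lt_self (Nat.pos_of_ne_zero h) (by norm_num)) c h1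
      · simp at h1; subst h1; split_ifs <;> simp

lemma pvFormat_isBin (m : Nat) : pvIsBin (pvFormatBin m) := by
  rw [pvFormat_eq]
  split_ifs with h
  · intro c hc; simp at hc; simp [hc]
  · exact pvCore_isBin m

lemma pvPad_isBin (w : Nat) (s : List Char) (hs : pvIsBin s) : pvIsBin (pvPad w s) := by
  intro c hc
  rcases List.mem_append.mp hc with h1 | h1
  · left; exact (List.eq_of_mem_replicate h1)
  · exact hs c h1

lemma pvParse_invert (s : List Char) (hs : pvIsBin s) :
    pvParseBin (pvInvert s) + pvParseBin s = 2 ^ s.length - 1 := by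
  induction s using List.reverseRecOn with
  | nil => simp [pvParseBin, pvInvert]
  | append_singleton s c ih =>
    have hbin : pvIsBin s := fun d hd => hs d (List.mem_append_left _ hd)
    have hc : c = '0' ∨ c = '1' := hs c (List.mem_append_right _ (by simp))
    have h1 : pvInvert (s ++ [c]) = pvInvert s ++ [if c = '0' then '1' else '0'] := by
      simp [pvInvert]
    rw [h1, pvParse_append, pvParse_append]
    have ih' := ih hbin
    have hp : (2 : Int) ^ (s ++ [c]).length = 2 * 2 ^ s.length := by
      simp [List.length_append, pow_succ]; ring
    rcases hc with h | h <;> subst h <;> simp <;> omega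

-- the masked value: the shared first step of both ports
lemma pvMain (number : Int) (n : Nat) (hn : 1 ≤ n) :
    int_to_signed_nbit number (n : Int) = int_to_signed_nbit_alt number (n : Int) := by
  unfold int_to_signed_nbit int_to_signed_nbit_alt
  simp only [Int.toNat_natCast]
  set mask : Int := 2 ^ n - 1 with hmask
  have hone : (1 : Int) ≤ 2 ^ n := one_le_pow₀ (by norm_num)
  have hmask0 : 0 ≤ mask := by omega
  set m : Int := PySem.Int.band number mask with hm
  obtain ⟨hm0, hmle⟩ := pvBand_bounds number mask hmask0
  have hmlt : m < 2 ^ n := by omega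
  -- the shift: ((n : Int) - 1).toNat = n - 1 and m >>> (n-1) = m / 2^(n-1)
  have hsub : ((n : Int) - 1).toNat = n - 1 := by omega
  rw [hsub]
  have hshift : m >>> (n - 1) = m / 2 ^ (n - 1) := by
    rw [Int.shiftRight_eq_div_pow]; norm_cast
  have hpow : (2 : Int) ^ n = 2 * 2 ^ (n - 1) := by
    rw [← pow_succ']
    congr 1
    omega
  have hppos : (0 : Int) < 2 ^ (n - 1) := by positivity
  have hdiv01 : m / 2 ^ (n - 1) = 0 ∨ m / 2 ^ (n - 1) = 1 := by
    have h1 : 0 ≤ m / 2 ^ (n - 1) := Int.ediv_nonneg hm0 (le_of_lt hppos)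
    have h2 : m / 2 ^ (n - 1) < 2 := by
      rw [Int.ediv_lt_iff_lt_mul hppos]
      omega
    omega
  -- padded format string facts
  have hbin := pvPad_isBin n (pvFormatBin m.toNat) (pvFormat_isBin m.toNat)
  have hparse : pvParseBin (pvPad n (pvFormatBin m.toNat)) = m := by
    unfold pvPad
    rw [pvParse_replicate_append, pvParse_format]
    omega
  have hmn : m.toNat < 2 ^ n := by
    exact_mod_cast (show ((m.toNat : Int)) < 2 ^ n by omega)
  have hlen : (pvFormatBin m.toNat).length ≤ n :=
    pvFormat_len_le n m.toNat hn hmn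
  have hlenpad : (pvPad n (pvFormatBin m.toNat)).length = n := by
    simp [pvPad]
    omega
  rcases hdiv01 with h01 | h01
  · -- MSB clear: both take the nonneg branch
    have hb : PySem.Int.band (m >>> (n - 1)) 1 = 0 := by
      rw [hshift, h01]; decide
    rw [hb]
    simp [hparse]
  · -- MSB set: A takes the string two's complement, B the closed form
    have hb : PySem.Int.band (m >>> (n - 1)) 1 = 1 := by
      rw [hshift, h01]; decide
    rw [hb]
    have hinv := pvParse_invert (pvPad n (pvFormatBin m.toNat)) hbin
    rw [hlenpad, hparse] at hinv
    simp only [ne_eq, one_ne_zero, not_false_eq_true, if_true, pvTwosComplement]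
    omega

-- ===== VERDICT (by name: the statement is the Claim_ definition above) =====
theorem int_to_signed_nbit_spec : Claim_equal_int_to_signed_nbit := by
  intro number n_bits _ hpre
  unfold Spec_int_to_signed_nbit
  have hn : n_bits = ((n_bits.toNat : Nat) : Int) := by
    unfold Pre_int_to_signed_nbit at hpre
    omega
  rw [hn]
  exact pvMain number n_bits.toNat (by unfold Pre_int_to_signed_nbit at hpre; omega)
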